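-- pv_equiv track=rewrite | github.com/poshan11/passport-photo-service-v2 | utils/process_images.py | generate_photo_positions
-- ===== SOURCE A (Python) =====
-- def generate_photo_positions(layout, photo_width, photo_height, canvas_width, canvas_height, num_copies):
--     """
--     Generate positions for photos on the canvas with centering.
--
--     Args:
--         layout: Layout information from calculate_layout_for_canvas
--         photo_width, photo_height: Individual photo dimensions
--         canvas_width, canvas_height: Canvas dimensions
--         num_copies: Number of copies to place
--
--     Returns:
--         List of (x, y) positions for each photo
--     """
--     cols = layout['cols']
--     rows = layout['rows']
--
--     # Calculate centering offsets
--     total_content_width = cols * photo_width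
--     total_content_height = rows * photo_height
--
--     offset_x = (canvas_width - total_content_width) // 2
--     offset_y = (canvas_height - total_content_height) // 2
--
--     positions = []
--
--     for i in range(num_copies):
--         row = i // cols
--         col = i % cols
--
--         x = offset_x + col * photo_width
--         y = offset_y + row * photo_height
--
--         positions.append((x, y))
--
--     return positions
-- ===== SOURCE B (Python) =====
-- def generate_photo_positions(layout, photo_width, photo_height, canvas_width, canvas_height, num_copies):
--     """Row-by-row walk of the grid instead of per-index divmod."""
--     cols = layout['cols']
--     rows = layout['rows']
--
--     offset_x = (canvas_width - cols * photo_width) // 2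
--     offset_y = (canvas_height - rows * photo_height) // 2
--
--     positions = []
--     placed = 0
--     row = 0
--     while placed < num_copies:
--         y = offset_y + row * photo_height
--         for col in range(cols):
--             positions.append((offset_x + col * photo_width, y))
--             placed += 1
--             if placed == num_copies:
--                 break
--         row += 1
--     return positions
-- ===== Notes on version B (the rewrite author's own statement) =====
-- stated objective: alternative
-- what changed: Replaces the single loop computing row/col of each index with divmod by a nested row-by-row walk over the grid (outer unbounded row loop, inner loop over the columns of the row, with a running placed-count and early break), so no division or modulo is performed per photo.
import Mathlib
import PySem

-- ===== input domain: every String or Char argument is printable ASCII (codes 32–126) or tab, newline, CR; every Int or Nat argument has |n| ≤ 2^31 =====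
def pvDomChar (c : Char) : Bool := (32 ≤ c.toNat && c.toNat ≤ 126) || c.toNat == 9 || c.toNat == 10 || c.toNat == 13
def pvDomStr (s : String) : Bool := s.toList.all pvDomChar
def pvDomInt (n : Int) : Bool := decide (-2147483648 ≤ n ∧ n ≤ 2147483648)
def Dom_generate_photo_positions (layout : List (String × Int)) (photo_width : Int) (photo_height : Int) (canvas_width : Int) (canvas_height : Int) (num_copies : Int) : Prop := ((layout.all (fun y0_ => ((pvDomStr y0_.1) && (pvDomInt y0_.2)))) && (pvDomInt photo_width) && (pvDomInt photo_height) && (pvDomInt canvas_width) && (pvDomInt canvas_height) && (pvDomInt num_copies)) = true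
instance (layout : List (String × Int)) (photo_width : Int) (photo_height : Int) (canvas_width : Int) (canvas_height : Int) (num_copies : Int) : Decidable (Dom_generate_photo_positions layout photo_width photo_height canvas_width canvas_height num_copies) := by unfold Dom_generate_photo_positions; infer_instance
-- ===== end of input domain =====

-- B replaces the per-index divmod loop with a nested row-by-row walk of the grid (alternative decomposition,
-- same cost); equivalence is proved on Pre_ (keys present, and cols > 0 whenever num_copies > 0).

-- ===== PORT A =====
def generate_photo_positions (layout : List (String × Int)) (photo_width : Int) (photo_height : Int) (canvas_width : Int) (canvas_height : Int) (num_copies : Int) : List (Int × Int) :=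
  let cols := ((PySem.Dict.mk layout).get? "cols").getD 0      -- Pre_ guarantees the key is present (KeyError otherwise)
  let rows := ((PySem.Dict.mk layout).get? "rows").getD 0
  let total_content_width := cols * photo_width
  let total_content_height := rows * photo_height
  let offset_x := PySem.Int.floordiv (canvas_width - total_content_width) 2
  let offset_y := PySem.Int.floordiv (canvas_height - total_content_height) 2
  (PySem.List.pyRange 0 num_copies 1).foldl
    (fun positions i =>
      let row := PySem.Int.floordiv i cols   -- ZeroDivisionError when cols = 0: excluded by Pre_
      let col := PySem.Int.mod i cols
      let x := offset_x + col * photo_width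
      let y := offset_y + row * photo_height
      positions ++ [(x, y)]) []

-- ===== PORT B =====
-- inner 'for col in range(cols)' with the running placed-count and the 'break' on placed == num_copies
def pvInnerB (offset_x photo_width y num_copies : Int) :
    List Int → Int → List (Int × Int) → List (Int × Int) × Int
  | [], placed, positions => (positions, placed)
  | c :: cs, placed, positions =>
      let positions' := positions ++ [(offset_x + c * photo_width, y)]
      let placed' := placed + 1
      if placed' = num_copies then (positions', placed')
      else pvInnerB offset_x photo_width y num_copies cs placed' positions'

-- outer 'while placed < num_copies' over the row counter; fuel models the unbounded while loop:
-- with cols > 0 each iteration places at least one photo, so fuel = num_copies.toNat never runs out inside Pre_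
def pvOuterB (offset_x offset_y photo_width photo_height cols num_copies : Int) :
    Nat → Int → Int → List (Int × Int) → List (Int × Int)
  | 0, _, _, positions => positions
  | fuel + 1, placed, row, positions =>
      if placed < num_copies then
        let y := offset_y + row * photo_height
        let res := pvInnerB offset_x photo_width y num_copies (PySem.List.pyRange 0 cols 1) placed positions
        pvOuterB offset_x offset_y photo_width photo_height cols num_copies fuel res.2 (row + 1) res.1
      else positions

def generate_photo_positions_alt (layout : List (String × Int)) (photo_width : Int) (photo_height : Int) (canvas_width : Int) (canvas_height : Int) (num_copies : Int) : List (Int × Int) :=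
  let cols := ((PySem.Dict.mk layout).get? "cols").getD 0
  let rows := ((PySem.Dict.mk layout).get? "rows").getD 0
  let offset_x := PySem.Int.floordiv (canvas_width - cols * photo_width) 2
  let offset_y := PySem.Int.floordiv (canvas_height - rows * photo_height) 2
  pvOuterB offset_x offset_y photo_width photo_height cols num_copies num_copies.toNat 0 0 []

-- ===== PRECONDITION & SPEC =====
-- A raises KeyError when 'cols'/'rows' is missing and ZeroDivisionError when cols = 0 with num_copies > 0.
-- Pre_ also excludes layouts with a NEGATIVE 'cols' count (with num_copies > 0), where A's grid positions come
-- accidentally from Python's floored divmod on a negative column count; B's row-by-row walk diverges there.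
def Pre_generate_photo_positions (layout : List (String × Int)) (photo_width : Int) (photo_height : Int) (canvas_width : Int) (canvas_height : Int) (num_copies : Int) : Prop :=
  ((PySem.Dict.mk layout).get? "cols").isSome = true ∧
  ((PySem.Dict.mk layout).get? "rows").isSome = true ∧
  (num_copies ≤ 0 ∨ 0 < ((PySem.Dict.mk layout).get? "cols").getD 0)
instance (layout : List (String × Int)) (photo_width : Int) (photo_height : Int) (canvas_width : Int) (canvas_height : Int) (num_copies : Int) : Decidable (Pre_generate_photo_positions layout photo_width photo_height canvas_width canvas_height num_copies) := by unfold Pre_generate_photo_positions; infer_instance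

def pvWitness_generate_photo_positions : (List (String × Int)) × Int × Int × Int × Int × Int :=
  ([("cols", 2), ("rows", 3)], 10, 12, 100, 100, 5)

def Spec_generate_photo_positions (layout : List (String × Int)) (photo_width : Int) (photo_height : Int) (canvas_width : Int) (canvas_height : Int) (num_copies : Int) (out : List (Int × Int)) : Prop := out = generate_photo_positions_alt layout photo_width photo_height canvas_width canvas_height num_copies
instance (layout : List (String × Int)) (photo_width : Int) (photo_height : Int) (canvas_width : Int) (canvas_height : Int) (num_copies : Int) (out : List (Int × Int)) : Decidable (Spec_generate_photo_positions layout photo_width photo_height canvas_width canvas_height num_copies out) := by unfold Spec_generate_photo_positions; infer_instance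

-- ===== CLAIM (what is proved, stated in full; the proofs are below) =====
def Claim_equal_generate_photo_positions : Prop := ∀ (layout : List (String × Int)) (photo_width : Int) (photo_height : Int) (canvas_width : Int) (canvas_height : Int) (num_copies : Int), Dom_generate_photo_positions layout photo_width photo_height canvas_width canvas_height num_copies → Pre_generate_photo_positions layout photo_width photo_height canvas_width canvas_height num_copies → Spec_generate_photo_positions layout photo_width photo_height canvas_width canvas_height num_copies (generate_photo_positions layout photo_width photo_height canvas_width canvas_height num_copies)

-- ===== LEMMAS AND PROOFS =====

-- the value A appends for index i
def pvG (offset_x offset_y photo_width photo_height cols : Int) (i : Int) : Int × Int :=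
  (offset_x + PySem.Int.mod i cols * photo_width,
   offset_y + PySem.Int.floordiv i cols * photo_height)

lemma pvG_at (ox oy pw ph cols row j : Int) (hc : 0 < cols) (hj0 : 0 ≤ j) (hj : j < cols) :
    pvG ox oy pw ph cols (row * cols + j) = (ox + j * pw, oy + row * ph) := by
  unfold pvG
  have h1 : (row * cols + j) % cols = j := by
    rw [Int.add_comm, Int.add_mul_emod_self_right]
    exact Int.emod_eq_of_lt hj0 hj
  have h2 : (row * cols + j) / cols = row := by
    rw [Int.add_comm, Int.add_mul_ediv_right _ _ (by omega : cols ≠ 0),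
        Int.ediv_eq_zero_of_lt hj0 hj, Int.zero_add]
  rw [PySem.Int.mod_eq_emod_of_pos hc, PySem.Int.floordiv_eq_ediv_of_pos hc, h1, h2]

lemma pvInnerB_spec (ox oy pw ph cols n : Int) (hc : 0 < cols) :
    ∀ (k : Nat) (j placed row : Int) (acc : List (Int × Int)),
      j = cols - (k : Int) → 0 ≤ j → placed = row * cols + j → placed ≤ n →
      (j = cols ∨ placed < n) →
      pvInnerB ox pw (oy + row * ph) n (PySem.List.pyRange j cols 1) placed acc
        = (acc ++ (PySem.List.pyRange placed (min (row * cols + cols) n) 1).map (pvG ox oy pw ph cols),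
           min (row * cols + cols) n) := by
  intro k
  induction k with
  | zero =>
      intro j placed row acc hk hj0 hp hpn _
      have hj : j = cols := by omega
      rw [hj, PySem.List.pyRange_one_eq_nil (le_refl cols)]
      have hm : min (row * cols + cols) n = placed := by omega
      rw [hm, PySem.List.pyRange_one_eq_nil (le_refl placed)]
      simp [pvInnerB]
  | succ k ih =>
      intro j placed row acc hk hj0 hp hpn hcase
      have hjlt : j < cols := by omega
      rw [PySem.List.pyRange_one_cons hjlt]
      have hplt : placed < n := by
        rcases hcase with h | h
        · omega
        · exact h
      have hgp : (ox + j * pw, oy + row * ph) = pvG ox oy pw ph cols placed := by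
        rw [hp, pvG_at ox oy pw ph cols row j hc hj0 hjlt]
      show (if placed + 1 = n then
              (acc ++ [(ox + j * pw, oy + row * ph)], placed + 1)
            else pvInnerB ox pw (oy + row * ph) n (PySem.List.pyRange (j+1) cols 1) (placed + 1)
                   (acc ++ [(ox + j * pw, oy + row * ph)])) = _
      by_cases hbreak : placed + 1 = n
      · rw [if_pos hbreak]
        have hm : min (row * cols + cols) n = n := by omega
        rw [hm, ← hbreak, PySem.List.pyRange_one_singleton, hgp]
        simp
      · rw [if_neg hbreak]
        rw [ih (j + 1) (placed + 1) row (acc ++ [(ox + j * pw, oy + row * ph)])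
              (by push_cast at hk ⊢; omega) (by omega) (by omega) (by omega)
              (by right; omega)]
        have hcons : PySem.List.pyRange placed (min (row * cols + cols) n) 1
            = placed :: PySem.List.pyRange (placed + 1) (min (row * cols + cols) n) 1 :=
          PySem.List.pyRange_one_cons (by omega)
        rw [hcons, hgp]
        simp

lemma pvOuterB_done (ox oy pw ph cols n : Int) (fuel : Nat) (placed row : Int)
    (acc : List (Int × Int)) (h : ¬ placed < n) :
    pvOuterB ox oy pw ph cols n fuel placed row acc = acc := by
  cases fuel with
  | zero => rfl
  | succ fuel => simp [pvOuterB, h]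

lemma pvOuterB_spec (ox oy pw ph cols n : Int) (hc : 0 < cols) :
    ∀ (fuel : Nat) (row : Int) (acc : List (Int × Int)),
      row * cols ≤ n → n ≤ row * cols + (fuel : Int) * cols →
      pvOuterB ox oy pw ph cols n fuel (row * cols) row acc
        = acc ++ (PySem.List.pyRange (row * cols) n 1).map (pvG ox oy pw ph cols) := by
  intro fuel
  induction fuel with
  | zero =>
      intro row acc h1 h2
      have : n = row * cols := by push_cast at h2; omega
      rw [this, PySem.List.pyRange_one_eq_nil (le_refl _)]
      simp [pvOuterB]
  | succ fuel ih =>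
      intro row acc h1 h2
      by_cases hlt : row * cols < n
      · simp only [pvOuterB, if_pos hlt]
        rw [pvInnerB_spec ox oy pw ph cols n hc cols.toNat 0 (row * cols) row acc
              (by omega) (le_refl 0) (by omega) (by omega) (by right; omega)]
        set m := min (row * cols + cols) n with hm
        by_cases hfull : row * cols + cols < n
        · have hmv : m = row * cols + cols := by omega
          have hmv' : m = (row + 1) * cols := by rw [hmv]; ring
          rw [hmv']
          rw [ih (row + 1) _ (by rw [← hmv', hmv]; omega)
                (by push_cast at h2 ⊢; nlinarith)]
          rw [← hmv']
          rw [List.append_assoc, ← List.map_append,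
              ← PySem.List.pyRange_one_append (row * cols) m n (by omega) (by omega)]
        · have hmv : m = n := by omega
          rw [hmv]
          rw [pvOuterB_done ox oy pw ph cols n fuel n (row + 1) _ (by omega)]
      · have heq : n = row * cols := by omega
        rw [heq, PySem.List.pyRange_one_eq_nil (le_refl _)]
        simp [pvOuterB]

-- ===== VERDICT (by name: the statement is the Claim_ definition above) =====
theorem generate_photo_positions_spec : Claim_equal_generate_photo_positions := by
  intro layout pw ph cw ch n _ hpre
  obtain ⟨_, _, hpre3⟩ := hpre
  unfold Spec_generate_photo_positions generate_photo_positions generate_photo_positions_alt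
  set cols := ((PySem.Dict.mk layout).get? "cols").getD 0 with hcols
  set rows := ((PySem.Dict.mk layout).get? "rows").getD 0 with hrows
  set ox := PySem.Int.floordiv (cw - cols * pw) 2 with hox
  set oy := PySem.Int.floordiv (ch - rows * ph) 2 with hoy
  by_cases hn : n ≤ 0
  · have h1 : PySem.List.pyRange 0 n 1 = [] := PySem.List.pyRange_one_eq_nil hn
    have h2 : n.toNat = 0 := by omega
    rw [h1, h2]
    rfl
  · have hc : 0 < cols := by rcases hpre3 with h | h <;> omega
    have hA : (PySem.List.pyRange 0 n 1).foldl
        (fun positions i => positions ++ [(ox + PySem.Int.mod i cols * pw, oy + PySem.Int.floordiv i cols * ph)]) []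
        = (PySem.List.pyRange 0 n 1).map (pvG ox oy pw ph cols) := by
      rw [PySem.List.foldl_append_singleton_eq_map]
      rfl
    have hB : pvOuterB ox oy pw ph cols n n.toNat (0 * cols) 0 []
        = [] ++ (PySem.List.pyRange (0 * cols) n 1).map (pvG ox oy pw ph cols) := by
      apply pvOuterB_spec ox oy pw ph cols n hc n.toNat 0 []
      · omega
      · have h1 : (n.toNat : Int) = n := Int.toNat_of_nonneg (by omega)
        rw [h1]
        nlinarith
    rw [Int.zero_mul] at hB
    simp only [List.nil_append] at hB
    exact hA.trans hB.symm
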